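-- pv_equiv track=rewrite | github.com/MiguelRojasV/RVMA_EX_FINAL_INF3631 | RVMA_P4_EXAMENFINAL.py | parse_path_p
-- ===== SOURCE A (Python) =====
-- dir = ["home", "var", "user", "Documents", "compi"]
--
-- def parse_path_p(s: str) -> bool:
--     if not s:
--         return True
--     if s.startswith('/'):
--         for dir_name in dir:
--             if s[1:].startswith(dir_name):
--                 return parse_path_p(s[1 + len(dir_name):])
--     return False
-- ===== SOURCE B (Python) =====
-- dir = ["home", "var", "user", "Documents", "compi"]
--
-- def parse_path_p(s: str) -> bool:
--     while s:
--         if not s.startswith('/'):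
--             return False
--         rest = s[1:]
--         for d in dir:
--             if rest.startswith(d):
--                 s = rest[len(d):]
--                 break
--         else:
--             return False
--     return True
-- ===== Notes on version B (the rewrite author's own statement) =====
-- stated objective: simpler
-- what changed: Replaces A's recursion (a recursive call per segment, with one shared trailing return False) by an explicit iterative while-loop over the shrinking suffix with a for/else to detect the no-match case.
import Mathlib
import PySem

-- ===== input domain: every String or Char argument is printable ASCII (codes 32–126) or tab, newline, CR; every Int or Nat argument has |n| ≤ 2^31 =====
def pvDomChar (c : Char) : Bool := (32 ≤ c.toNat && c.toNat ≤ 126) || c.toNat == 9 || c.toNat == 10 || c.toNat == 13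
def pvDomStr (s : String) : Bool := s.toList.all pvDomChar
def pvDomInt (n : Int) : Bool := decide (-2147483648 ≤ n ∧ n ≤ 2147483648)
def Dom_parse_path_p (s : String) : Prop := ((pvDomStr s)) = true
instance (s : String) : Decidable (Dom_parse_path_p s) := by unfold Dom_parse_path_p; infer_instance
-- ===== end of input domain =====

-- B replaces A's recursion by an explicit iterative loop over the shrinking suffix
-- with a separate first-match helper (the for/else); return value only, same results.

-- ===== PORT A =====
-- the module-level list `dir`
def pvDirs : List String := ["home", "var", "user", "Documents", "compi"]

-- A, step for step: empty → True; startswith '/' → first dir matching s[1:] recurses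
-- on s[1+len(d):]; the shared trailing `return False` otherwise  (on List Char;
-- the `for … return` is the first match, i.e. List.find?)
def parseA : List Char → Bool
  | [] => true
  | c :: t =>
    if c = '/' then
      match pvDirs.find? (fun d => PySem.Chars.startswith t d.toList) with
      | some d => parseA (t.drop d.toList.length)
      | none => false
    else false
termination_by l => l.length
decreasing_by simp [List.length_drop]

def parse_path_p (s : String) : Bool := parseA s.toList

-- ===== PORT B =====
-- B's inner for/else: scan the dir list, return the remainder after the first
-- matching name, or none if no name matches
def pvMatchSeg : List String → List Char → Option (List Char)
  | [], _ => none
  | d :: ds, r =>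
    if PySem.Chars.startswith r d.toList then some (r.drop d.toList.length)
    else pvMatchSeg ds r

theorem pvMatchSeg_length {ds : List String} {r r' : List Char}
    (h : pvMatchSeg ds r = some r') : r'.length ≤ r.length := by
  induction ds with
  | nil => simp [pvMatchSeg] at h
  | cons d ds ih =>
    by_cases hd : PySem.Chars.startswith r d.toList
    · simp [pvMatchSeg, hd] at h
      subst h; simp
    · simp [pvMatchSeg, hd] at h
      exact ih h

-- B's while-loop, as a tail recursion on the suffix held in `s`
-- (the for/else's matched-flag is the isSome test on the helper's result)
def parseB (t : List Char) : Bool :=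
  match t with
  | [] => true
  | c :: r =>
    if c = '/' then
      let m := pvMatchSeg pvDirs r
      if hm : m.isSome then parseB (m.get hm) else false
    else false
termination_by t.length
decreasing_by
  have h2 : pvMatchSeg pvDirs r = some (m.get hm) := (Option.some_get hm).symm
  have h3 := pvMatchSeg_length h2
  simp only [List.length_cons]
  exact Nat.lt_succ_of_le h3

def parse_path_p_alt (s : String) : Bool := parseB s.toList

-- ===== PRECONDITION & SPEC =====
def Spec_parse_path_p (s : String) (out : Bool) : Prop := out = parse_path_p_alt s
instance (s : String) (out : Bool) : Decidable (Spec_parse_path_p s out) := by unfold Spec_parse_path_p; infer_instance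

-- ===== CLAIM (what is proved, stated in full; the proofs are below) =====
def Claim_equal_parse_path_p : Prop := ∀ (s : String), Dom_parse_path_p s → Spec_parse_path_p s (parse_path_p s)

-- ===== LEMMAS AND PROOFS =====

-- B's first-match helper returns exactly what A's find?-then-drop computes
theorem pvMatchSeg_eq_find (ds : List String) (r : List Char) :
    pvMatchSeg ds r =
      (ds.find? (fun d => PySem.Chars.startswith r d.toList)).map
        (fun d => r.drop d.toList.length) := by
  induction ds with
  | nil => simp [pvMatchSeg]
  | cons d ds ih =>
    by_cases hd : PySem.Chars.startswith r d.toList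
    · simp [pvMatchSeg, hd, List.find?]
    · simp [pvMatchSeg, hd, List.find?, ih]

theorem parseA_eq_parseB (t : List Char) : parseA t = parseB t := by
  induction t using parseA.induct with
  | case1 => rw [parseA.eq_def, parseB.eq_def]
  | case2 t d hf ih =>
    have hm : pvMatchSeg pvDirs t = some (t.drop d.toList.length) := by
      rw [pvMatchSeg_eq_find, hf, Option.map_some]
    rw [parseA.eq_def, parseB.eq_def]
    simp [hf, hm]
    exact ih
  | case3 t hf =>
    have hm : pvMatchSeg pvDirs t = none := by
      rw [pvMatchSeg_eq_find, hf, Option.map_none]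
    rw [parseA.eq_def, parseB.eq_def]
    simp [hf, hm]
  | case4 c t hc =>
    rw [parseA.eq_def, parseB.eq_def]
    simp [hc]

theorem parse_path_p_spec : Claim_equal_parse_path_p := by
  intro s _
  unfold Spec_parse_path_p parse_path_p parse_path_p_alt
  exact parseA_eq_parseB s.toList
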